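-- pv_equiv track=rewrite | github.com/thecfitz/python-final-project | tweet_module.py | topic_time_list
-- ===== SOURCE A (Python) =====
-- def topic_time_list(tweet_list, policy_words):
--     #this for-loop creates the outline of topics_time, which holds tuples containing a word and an empty set.
--     topics_time = []
--     for word in policy_words:
--         topics_time.append((word, []))
--     # this loop appends the tuples in topics_time with all the dates corresponding to each word.
--     for num_row, row in enumerate(tweet_list):
--         for num_set, set in enumerate(topics_time):
--             if set[0] in row[0]:
--                 set[1].append(row[1])
--     return topics_time
-- ===== SOURCE B (Python) =====
-- def topic_time_list(tweet_list, policy_words):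
--     # substring-hashing: per tweet, enumerate its substrings of the needed lengths
--     # and look each up in a hash set of the policy words; no per-word scan of the text
--     wordset = set(policy_words)
--     lengths = {len(w) for w in policy_words}
--     matches = []
--     for text, date in tweet_list:
--         found = {text[i:i + L] for L in lengths for i in range(len(text) - L + 1)
--                  if text[i:i + L] in wordset}
--         matches.append((found, date))
--     return [(w, [date for found, date in matches if w in found])
--             for w in policy_words]
-- ===== Notes on version B (the rewrite author's own statement) =====
-- stated objective: alternative
-- what changed: Replaces A's per-tweet scan over every policy word (one substring test per word per tweet) with substring hashing: per tweet it enumerates the tweet's substrings of the needed lengths and looks each up in a hash set of the policy words, then emits per-word date lists from the precomputed per-tweet match sets.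
import Mathlib
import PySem

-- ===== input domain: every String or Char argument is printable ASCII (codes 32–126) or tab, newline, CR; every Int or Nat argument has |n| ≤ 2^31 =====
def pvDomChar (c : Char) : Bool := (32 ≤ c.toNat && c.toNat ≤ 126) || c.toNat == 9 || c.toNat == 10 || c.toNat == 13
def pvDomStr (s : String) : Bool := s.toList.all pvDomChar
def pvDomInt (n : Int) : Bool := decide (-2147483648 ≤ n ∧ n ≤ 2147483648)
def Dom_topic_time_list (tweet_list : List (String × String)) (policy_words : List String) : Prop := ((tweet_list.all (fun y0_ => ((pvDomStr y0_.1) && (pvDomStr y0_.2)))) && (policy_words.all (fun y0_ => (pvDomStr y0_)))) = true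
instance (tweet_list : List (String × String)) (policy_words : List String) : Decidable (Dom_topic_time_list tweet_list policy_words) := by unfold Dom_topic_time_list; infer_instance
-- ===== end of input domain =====

-- B replaces A's per-word substring tests with substring hashing: per tweet it
-- enumerates the tweet's substrings of the needed lengths and looks them up in a
-- hash set of the policy words; same result, a genuinely different matching algorithm.

-- ===== PORT A =====
-- processing one tweet row: the inner 'for num_set, set in enumerate(topics_time)'
-- loop appends row.2 to set[1] exactly when set[0] occurs in row.1 (in-place append = pointwise map)
def pvRowStep (tt : List (String × List String)) (row : String × String) : List (String × List String) :=
  tt.map (fun s => if PySem.Str.isIn s.1 row.1 then (s.1, s.2 ++ [row.2]) else s)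

def topic_time_list (tweet_list : List (String × String)) (policy_words : List String) : List (String × List String) :=
  let topics_time := policy_words.foldl (fun acc word => acc ++ [(word, [])]) []
  tweet_list.foldl pvRowStep topics_time

-- ===== PORT B =====
-- Source B's set comprehension: substrings of text of each length L in `lengths`
-- that are members of `wordset` (hash-set lookup), collected as a set
def pvFound (wordset : PySem.Set String) (lengths : PySem.Set Int) (text : String) : PySem.Set String :=
  PySem.Set.ofList
    ((lengths.flatMap (fun L =>
        (PySem.List.pyRange 0 (PySem.Str.len text - L + 1) 1).map
          (fun i => PySem.Str.slice text (some i) (some (i + L))))).filter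
      (fun sub => wordset.contains sub))

def topic_time_list_alt (tweet_list : List (String × String)) (policy_words : List String) : List (String × List String) :=
  let wordset := PySem.Set.ofList policy_words
  let lengths := PySem.Set.ofList (policy_words.map PySem.Str.len)
  let matched := tweet_list.map (fun row => (pvFound wordset lengths row.1, row.2))
  policy_words.map (fun w => (w, (matched.filter (fun m => m.1.contains w)).map (fun m => m.2)))

-- ===== PRECONDITION & SPEC =====
def Spec_topic_time_list (tweet_list : List (String × String)) (policy_words : List String) (out : List (String × List String)) : Prop := out = topic_time_list_alt tweet_list policy_words
instance (tweet_list : List (String × String)) (policy_words : List String) (out : List (String × List String)) : Decidable (Spec_topic_time_list tweet_list policy_words out) := by unfold Spec_topic_time_list; infer_instance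

-- ===== CLAIM (what is proved, stated in full; the proofs are below) =====
def Claim_equal_topic_time_list : Prop := ∀ (tweet_list : List (String × String)) (policy_words : List String), Dom_topic_time_list tweet_list policy_words → Spec_topic_time_list tweet_list policy_words (topic_time_list tweet_list policy_words)

-- ===== LEMMAS AND PROOFS =====

-- dates of the tweets whose text contains w (the common reference value)
def pvDates (tweet_list : List (String × String)) (w : String) : List String :=
  (tweet_list.filter (fun row => PySem.Str.isIn w row.1)).map (fun row => row.2)

-- A's fold over the tweets appends, to each entry of the state, exactly the matching dates
theorem pvFold_eq (tweet_list : List (String × String)) (st : List (String × List String)) :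
    tweet_list.foldl pvRowStep st = st.map (fun p => (p.1, p.2 ++ pvDates tweet_list p.1)) := by
  induction tweet_list generalizing st with
  | nil => simp [pvDates]
  | cons row rest ih =>
    simp only [List.foldl_cons, ih, pvRowStep, List.map_map]
    refine List.map_congr_left (fun p _ => ?_)
    simp only [Function.comp, pvDates, List.filter_cons]
    by_cases h : PySem.Chars.isIn p.1.toList row.1.toList = true <;> simp [h]

theorem pvInit_eq (policy_words : List String) :
    policy_words.foldl (fun acc word => acc ++ [((word : String), ([] : List String))]) [] =
      policy_words.map (fun w => (w, [])) := by
  simpa using (PySem.List.foldl_append_singleton_eq_map (fun w => ((w : String), ([] : List String))) policy_words [])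

-- B's per-tweet matched set contains w iff w occurs in the text, for any policy word w
theorem pvFound_contains (policy_words : List String) (w : String) (hw : w ∈ policy_words)
    (text : String) :
    (pvFound (PySem.Set.ofList policy_words) (PySem.Set.ofList (policy_words.map PySem.Str.len)) text).contains w
      = PySem.Str.isIn w text := by
  rw [Bool.eq_iff_iff, PySem.Set.contains_iff, PySem.Str.isIn_iff_infix]
  unfold pvFound
  rw [PySem.Set.mem_ofList, List.mem_filter]
  constructor
  · rintro ⟨hmem, -⟩
    rw [List.mem_flatMap] at hmem
    obtain ⟨L, hL, hsub⟩ := hmem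
    rw [List.mem_map] at hsub
    obtain ⟨i, hi, hslice⟩ := hsub
    rw [PySem.List.mem_pyRange_one] at hi
    -- the slice is a drop/take of text, hence an infix
    have : w.toList = (text.toList.drop i.toNat).take ((i + L).toNat - i.toNat) := by
      rw [← hslice, PySem.Str.toList_slice, PySem.Chars.slice,
        PySem.List.slice_toNat]
      · exact hi.1
      · rw [PySem.Set.mem_ofList, List.mem_map] at hL
        obtain ⟨w', -, rfl⟩ := hL
        have := PySem.Str.len_eq w'
        omega
    rw [this]
    exact ((List.take_prefix _ _).isInfix).trans (List.drop_suffix _ _).isInfix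
  · intro hinf
    obtain ⟨s, t, hst⟩ := hinf
    refine ⟨?_, by
      rw [PySem.Set.contains_iff, PySem.Set.mem_ofList]; exact hw⟩
    rw [List.mem_flatMap]
    refine ⟨PySem.Str.len w, by
      rw [PySem.Set.mem_ofList, List.mem_map]; exact ⟨w, hw, rfl⟩, ?_⟩
    rw [List.mem_map]
    refine ⟨(s.length : Int), ?_, ?_⟩
    · rw [PySem.List.mem_pyRange_one]
      have hlen : text.toList.length = s.length + w.toList.length + t.length := by
        rw [← hst]; simp only [List.length_append]
      rw [PySem.Str.len_eq, PySem.Str.len_eq]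
      constructor <;> omega
    · have : ((s.length : Int) + PySem.Str.len w) = ((s.length : Nat) : Int) + ((w.toList.length : Nat) : Int) := by
        rw [PySem.Str.len_eq]
      rw [this]
      have hsl : PySem.Str.slice text (some (s.length : Int)) (some ((s.length : Int) + (w.toList.length : Int)))
          = String.ofList ((text.toList.drop s.length).take w.toList.length) := by
        simp [PySem.Str.slice, PySem.Chars.slice, PySem.List.slice_natCast_add]
      rw [hsl, ← hst]
      have h2 : List.take w.toList.length (List.drop s.length (s ++ w.toList ++ t)) = w.toList := by
        rw [List.append_assoc]; simp
      rw [h2, String.ofList_toList]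

-- ===== VERDICT (by name: the statement is the Claim_ definition above) =====
theorem topic_time_list_spec : Claim_equal_topic_time_list := by
  intro tweet_list policy_words _
  unfold Spec_topic_time_list topic_time_list topic_time_list_alt
  simp only [pvInit_eq, pvFold_eq, List.map_map]
  refine List.map_congr_left (fun w hw => ?_)
  simp only [Function.comp, List.nil_append, Prod.mk.injEq, true_and]
  rw [List.filter_map, List.map_map]
  unfold pvDates
  congr 1
  refine List.filter_congr (fun row _ => ?_)
  simp only [Function.comp]
  exact (pvFound_contains policy_words w hw row.1).symm
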